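-- pv_equiv track=rewrite | github.com/maxkim77/Codingtest | 프로그래머스/unrated/181854. 배열의 길이에 따라 다른 연산하기/배열의 길이에 따라 다른 연산하기.py | solution
-- ===== SOURCE A (Python) =====
-- def solution(arr, n):
--     # 배열의 길이가 홀수인지 짝수인지 확인합니다.
--     is_odd_length = len(arr) % 2 == 1
--
--     # 결과를 저장할 빈 배열을 생성합니다.
--     result = []
--
--     # 주어진 배열을 순회합니다.
--     for i, num in enumerate(arr):
--         # 배열의 길이가 홀수이고 현재 인덱스가 짝수인 경우,
--         # 또는 배열의 길이가 짝수이고 현재 인덱스가 홀수인 경우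
--         if (is_odd_length and i % 2 == 0) or (not is_odd_length and i % 2 == 1):
--             # 현재 숫자에 n을 더하여 result에 추가합니다.
--             result.append(num + n)
--         else:
--             # 그렇지 않은 경우 현재 숫자를 그대로 result에 추가합니다.
--             result.append(num)
--
--     # 결과 배열을 반환합니다.
--     return result
-- ===== SOURCE B (Python) =====
-- def solution(arr, n):
--     # copy the input, then add n only at the affected indices (stride 2)
--     result = list(arr)
--     start = (len(arr) + 1) % 2
--     for i in range(start, len(arr), 2):
--         result[i] += n
--     return result
-- ===== Notes on version B (the rewrite author's own statement) =====
-- stated objective: faster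
-- what changed: Instead of branching on parity for every element while rebuilding the list with append, B copies the input once and runs a strided loop (start, start+2, ...) that touches only the half of the indices that change.
import Mathlib
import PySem

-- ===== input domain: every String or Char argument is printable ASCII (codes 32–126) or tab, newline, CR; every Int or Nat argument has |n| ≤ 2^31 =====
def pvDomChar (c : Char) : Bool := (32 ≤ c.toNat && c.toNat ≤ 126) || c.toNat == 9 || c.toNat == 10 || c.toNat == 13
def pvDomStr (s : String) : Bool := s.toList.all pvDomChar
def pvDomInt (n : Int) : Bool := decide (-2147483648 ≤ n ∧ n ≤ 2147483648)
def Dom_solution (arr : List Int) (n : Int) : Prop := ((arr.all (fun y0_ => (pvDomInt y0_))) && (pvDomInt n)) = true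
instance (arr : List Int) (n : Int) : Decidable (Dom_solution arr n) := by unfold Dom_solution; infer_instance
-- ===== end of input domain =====

-- B replaces A's branch-on-parity full rebuild by a copy plus a strided pass over the affected indices (alternative decomposition).

-- ===== PORT A =====
def solution (arr : List Int) (n : Int) : List Int :=
  let isOddLength : Bool := PySem.Int.mod (PySem.List.len arr) 2 == 1
  (PySem.List.enumerate arr).foldl
    (fun result p =>
      if (isOddLength && (PySem.Int.mod p.1 2 == 0)) || (!isOddLength && (PySem.Int.mod p.1 2 == 1)) then
        result ++ [p.2 + n]
      else
        result ++ [p.2])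
    []

-- ===== PORT B =====
def solution_alt (arr : List Int) (n : Int) : List Int :=
  let start := PySem.Int.mod (PySem.List.len arr + 1) 2
  (PySem.List.pyRange start (PySem.List.len arr) 2).foldl
    (fun result i => PySem.List.pySetD result i (PySem.List.pyGetD result i 0 + n))
    arr

-- ===== PRECONDITION & SPEC =====
def Spec_solution (arr : List Int) (n : Int) (out : List Int) : Prop := out = solution_alt arr n
instance (arr : List Int) (n : Int) (out : List Int) : Decidable (Spec_solution arr n out) := by unfold Spec_solution; infer_instance

-- ===== CLAIM (what is proved, stated in full; the proofs are below) =====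
def Claim_equal_solution : Prop := ∀ (arr : List Int) (n : Int), Dom_solution arr n → Spec_solution arr n (solution arr n)

-- ===== LEMMAS AND PROOFS =====

-- The loop body of B, with nonnegative in-range indices reduced to List.set / List.getD.
def pvStep (n : Int) (result : List Int) (i : Int) : List Int :=
  PySem.List.pySetD result i (PySem.List.pyGetD result i 0 + n)

theorem pvStep_length (n : Int) (result : List Int) (i : Int) :
    (pvStep n result i).length = result.length := by
  simp [pvStep, PySem.List.length_pySetD]

theorem pvFold_length (n : Int) (l : List Int) (acc : List Int) :
    (l.foldl (pvStep n) acc).length = acc.length := by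
  induction l generalizing acc with
  | nil => rfl
  | cons i l ih => simp [List.foldl_cons, ih, pvStep_length]

-- Each in-range index in a Nodup index list is incremented exactly once, in any order.
theorem pvFold_getD (n : Int) (l : List Int) (acc : List Int)
    (hl : ∀ i ∈ l, 0 ≤ i ∧ i < (acc.length : Int)) (hnd : l.Nodup) (j : Nat) :
    (l.foldl (pvStep n) acc).getD j 0 =
      acc.getD j 0 + (if (j : Int) ∈ l then n else 0) := by
  induction l generalizing acc with
  | nil => simp
  | cons i l ih =>
    obtain ⟨hi0, hilt⟩ := hl i (by simp)
    have hstep : pvStep n acc i = acc.set i.toNat (acc.getD i.toNat 0 + n) := by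
      simp [pvStep, PySem.List.pySetD_of_nonneg _ _ hi0, PySem.List.pyGetD_of_nonneg,
        hi0, List.getD_eq_getElem?_getD]
    have hl' : ∀ x ∈ l, 0 ≤ x ∧ x < ((pvStep n acc i).length : Int) := by
      intro x hx
      have := hl x (by simp [hx])
      simpa [pvStep_length] using this
    rw [List.foldl_cons, ih (pvStep n acc i) hl' hnd.of_cons]
    have hitoNat : ((i.toNat : Int)) = i := Int.toNat_of_nonneg hi0
    by_cases hji : (j : Int) = i
    · have hjnat : j = i.toNat := by omega
      subst hjnat
      have hjlt : i.toNat < acc.length := by omega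
      have hnotmem : i ∉ l := (List.nodup_cons.mp hnd).1
      rw [hstep, hitoNat, List.getD_eq_getElem _ _ (by simpa using hjlt),
          List.getElem_set, if_pos rfl]
      simp [hnotmem]
    · have hij : i.toNat ≠ j := by omega
      have hgd : (pvStep n acc i).getD j 0 = acc.getD j 0 := by
        rw [hstep]
        by_cases hjlt : j < acc.length
        · rw [List.getD_eq_getElem _ _ (by simpa using hjlt),
              List.getD_eq_getElem _ _ hjlt, List.getElem_set_ne hij]
        · rw [List.getD_eq_default _ _ (by simpa using Nat.le_of_not_lt hjlt),
              List.getD_eq_default _ _ (Nat.le_of_not_lt hjlt)]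
      rw [hgd]
      simp [List.mem_cons, hji]

-- A's fold is the map of the per-element branch over the enumeration.
theorem pvA_map (arr : List Int) (n : Int) (c : Int × Int → Bool) :
    ((PySem.List.enumerate arr).foldl
      (fun result p => if c p then result ++ [p.2 + n] else result ++ [p.2]) []) =
    (PySem.List.enumerate arr).map (fun p => if c p then p.2 + n else p.2) := by
  have hfun : (fun (result : List Int) (p : Int × Int) =>
      if c p then result ++ [p.2 + n] else result ++ [p.2]) =
      (fun result p => result ++ [if c p then p.2 + n else p.2]) := by
    funext r p; split <;> rfl
  rw [hfun, PySem.List.foldl_append_singleton_eq_map]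
  rfl

-- ===== VERDICT (by name: the statement is the Claim_ definition above) =====
-- pyRange with positive step has no duplicate indices.
theorem pvNodup_pyRange (a b : Int) : (PySem.List.pyRange a b 2).Nodup := by
  rw [PySem.List.pyRange_of_pos a b (by norm_num)]
  exact List.Nodup.map (fun x y hxy => by omega) List.nodup_range

theorem solution_spec : Claim_equal_solution := by
  intro arr n _
  unfold Spec_solution solution solution_alt
  simp only [PySem.List.len_eq]
  refine (pvA_map arr n (fun p =>
    ((PySem.Int.mod ((arr.length : Int)) 2 == 1) && (PySem.Int.mod p.1 2 == 0)) ||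
    (!(PySem.Int.mod ((arr.length : Int)) 2 == 1) && (PySem.Int.mod p.1 2 == 1)))).trans ?_
  show _ = List.foldl (pvStep n) arr _
  have h2 : (0 : Int) < 2 := by norm_num
  set L : Int := (arr.length : Int) with hL
  set s : Int := PySem.Int.mod (L + 1) 2 with hs
  have hs' : s = (L + 1) % 2 := by rw [hs, PySem.Int.mod_eq_emod_of_pos h2]
  have hmem : ∀ x : Int, x ∈ PySem.List.pyRange s L 2 ↔ s ≤ x ∧ x < L ∧ (2:Int) ∣ x - s :=
    PySem.List.mem_pyRange_iff_of_pos h2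
  have hl : ∀ i ∈ PySem.List.pyRange s L 2, 0 ≤ i ∧ i < (arr.length : Int) := by
    intro i hi
    have := (hmem i).mp hi
    omega
  refine List.ext_getElem ?_ ?_
  · simp [pvFold_length, PySem.List.length_enumerate]
  · intro j h1 h2'
    have hjlen : j < arr.length := by simpa [PySem.List.length_enumerate] using h1
    rw [List.getElem_map, PySem.List.getElem_enumerate]
    rw [← List.getD_eq_getElem _ 0 h2',
        pvFold_getD n _ arr hl (pvNodup_pyRange s L),
        List.getD_eq_getElem _ 0 hjlen]
    have hcond : (((PySem.Int.mod L 2 == 1) && (PySem.Int.mod (0 + (j:Int)) 2 == 0)) ||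
        (!(PySem.Int.mod L 2 == 1) && (PySem.Int.mod (0 + (j:Int)) 2 == 1))) = true ↔
        ((j : Int) ∈ PySem.List.pyRange s L 2) := by
      rw [hmem]
      simp only [PySem.Int.mod_eq_emod_of_pos h2, Bool.or_eq_true, Bool.and_eq_true,
        beq_iff_eq, Bool.not_eq_eq_eq_not, Bool.not_true, beq_eq_false_iff_ne, ne_eq]
      omega
    by_cases hc : ((j : Int) ∈ PySem.List.pyRange s L 2)
    · rw [if_pos (hcond.mpr hc), if_pos hc]
    · rw [if_neg (fun h => hc (hcond.mp h)), if_neg hc, add_zero]
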